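-- pv_equiv track=rewrite | github.com/ceoeventontology/CEOEventOntology | name_generation.py | prepro_sentence_pair_single
-- ===== SOURCE A (Python) =====
-- def prepro_sentence_pair_single(ids1, ids2, max_length,
--                                 allow_truncation=False):
--     # assert len(ids2) == 1
--     if allow_truncation and len(ids1) + len(ids2) > max_length:
--         ids1 = ids1[len(ids1) + len(ids2) - max_length:]  # len = max_length-len(ids2)
--         assert len(ids1) + len(ids2) == max_length
--
--     n_mask = max_length - len(ids1) - len(ids2)
--     assert n_mask >= 0, (max_length, len(ids1), len(ids2))
--     input_ids = ids1 + ids2 + [0 for _ in range(n_mask)]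
--     attention_mask = [1 for _ in ids1 + ids2] + [0 for _ in range(n_mask)]
--     token_type_ids = [0 for _ in ids1] + [1 for _ in ids2] + [0 for _ in range(n_mask)]
--     return input_ids, attention_mask, token_type_ids
-- ===== SOURCE B (Python) =====
-- def prepro_sentence_pair_single(ids1, ids2, max_length,
--                                 allow_truncation=False):
--     if allow_truncation and len(ids1) + len(ids2) > max_length:
--         ids1 = ids1[len(ids1) + len(ids2) - max_length:]
--         assert len(ids1) + len(ids2) == max_length
--
--     n_mask = max_length - len(ids1) - len(ids2)
--     assert n_mask >= 0, (max_length, len(ids1), len(ids2))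
--     n1, n2 = len(ids1), len(ids2)
--     input_ids, attention_mask, token_type_ids = [], [], []
--     for i in range(max_length):
--         if i < n1:
--             input_ids.append(ids1[i])
--             attention_mask.append(1)
--             token_type_ids.append(0)
--         elif i < n1 + n2:
--             input_ids.append(ids2[i - n1])
--             attention_mask.append(1)
--             token_type_ids.append(1)
--         else:
--             input_ids.append(0)
--             attention_mask.append(0)
--             token_type_ids.append(0)
--     return input_ids, attention_mask, token_type_ids
-- ===== Notes on version B (the rewrite author's own statement) =====
-- stated objective: alternative
-- what changed: Replaced the three separate segment-concatenation passes (list additions and per-segment comprehensions) by a single position-indexed loop over range(max_length) that branches on which segment index i falls in and appends to all three output lists at once.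
import Mathlib
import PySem

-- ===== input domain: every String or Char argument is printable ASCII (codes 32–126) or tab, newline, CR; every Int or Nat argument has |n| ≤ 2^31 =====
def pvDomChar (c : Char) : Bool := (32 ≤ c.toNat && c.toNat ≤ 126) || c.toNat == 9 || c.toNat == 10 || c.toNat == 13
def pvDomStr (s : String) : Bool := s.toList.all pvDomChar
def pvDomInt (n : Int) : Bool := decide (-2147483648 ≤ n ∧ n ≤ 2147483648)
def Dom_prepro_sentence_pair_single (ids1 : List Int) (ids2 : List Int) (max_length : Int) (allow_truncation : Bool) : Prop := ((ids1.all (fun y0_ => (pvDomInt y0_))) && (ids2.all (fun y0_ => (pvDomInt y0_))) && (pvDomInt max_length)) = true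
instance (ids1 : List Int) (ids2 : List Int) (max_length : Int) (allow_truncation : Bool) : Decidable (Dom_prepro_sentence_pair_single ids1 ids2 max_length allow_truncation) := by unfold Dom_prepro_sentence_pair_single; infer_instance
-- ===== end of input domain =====

-- B fuses A's three segment-concatenation passes into one position-indexed loop over
-- range(max_length) that appends to all three output lists at once (alternative decomposition).


-- ===== PORT A =====
def prepro_sentence_pair_single (ids1 : List Int) (ids2 : List Int) (max_length : Int) (allow_truncation : Bool) : List Int × List Int × List Int :=
  let ids1 :=
    if allow_truncation && decide ((ids1.length : Int) + (ids2.length : Int) > max_length) then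
      PySem.List.slice ids1 (some ((ids1.length : Int) + (ids2.length : Int) - max_length)) none
    else ids1
  let n_mask : Int := max_length - (ids1.length : Int) - (ids2.length : Int)
  let input_ids := ids1 ++ ids2 ++ (PySem.List.pyRange 0 n_mask 1).map (fun _ => (0 : Int))
  let attention_mask := (ids1 ++ ids2).map (fun _ => (1 : Int)) ++ (PySem.List.pyRange 0 n_mask 1).map (fun _ => (0 : Int))
  let token_type_ids := ids1.map (fun _ => (0 : Int)) ++ ids2.map (fun _ => (1 : Int)) ++ (PySem.List.pyRange 0 n_mask 1).map (fun _ => (0 : Int))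
  (input_ids, attention_mask, token_type_ids)

-- ===== PORT B =====
-- ids1[i] / ids2[i-n1] are ported with pyGetD; the guarding branch makes the index in range,
-- so the default is never the value used on any admitted input.
def prepro_sentence_pair_single_alt (ids1 : List Int) (ids2 : List Int) (max_length : Int) (allow_truncation : Bool) : List Int × List Int × List Int :=
  let ids1 :=
    if allow_truncation && decide ((ids1.length : Int) + (ids2.length : Int) > max_length) then
      PySem.List.slice ids1 (some ((ids1.length : Int) + (ids2.length : Int) - max_length)) none
    else ids1
  let n1 : Int := ids1.length
  let n2 : Int := ids2.length
  (PySem.List.pyRange 0 max_length 1).foldl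
    (fun acc i =>
      if i < n1 then
        (acc.1 ++ [PySem.List.pyGetD ids1 i 0], acc.2.1 ++ [(1 : Int)], acc.2.2 ++ [(0 : Int)])
      else if i < n1 + n2 then
        (acc.1 ++ [PySem.List.pyGetD ids2 (i - n1) 0], acc.2.1 ++ [(1 : Int)], acc.2.2 ++ [(1 : Int)])
      else
        (acc.1 ++ [(0 : Int)], acc.2.1 ++ [(0 : Int)], acc.2.2 ++ [(0 : Int)]))
    ([], [], [])

-- ===== PRECONDITION & SPEC =====
-- Pre_ excludes exactly the inputs on which A's asserts fail (AssertionError): without effective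
-- truncation this is len(ids1)+len(ids2) > max_length; with truncation, len(ids2) > max_length.
def Pre_prepro_sentence_pair_single (ids1 : List Int) (ids2 : List Int) (max_length : Int) (allow_truncation : Bool) : Prop :=
  if allow_truncation = true ∧ (ids1.length : Int) + (ids2.length : Int) > max_length then
    (ids2.length : Int) ≤ max_length
  else
    (ids1.length : Int) + (ids2.length : Int) ≤ max_length
instance (ids1 : List Int) (ids2 : List Int) (max_length : Int) (allow_truncation : Bool) : Decidable (Pre_prepro_sentence_pair_single ids1 ids2 max_length allow_truncation) := by unfold Pre_prepro_sentence_pair_single; infer_instance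

def pvWitness_prepro_sentence_pair_single : List Int × List Int × Int × Bool := ([5, 6], [7], 5, false)

def Spec_prepro_sentence_pair_single (ids1 : List Int) (ids2 : List Int) (max_length : Int) (allow_truncation : Bool) (out : List Int × List Int × List Int) : Prop := out = prepro_sentence_pair_single_alt ids1 ids2 max_length allow_truncation
instance (ids1 : List Int) (ids2 : List Int) (max_length : Int) (allow_truncation : Bool) (out : List Int × List Int × List Int) : Decidable (Spec_prepro_sentence_pair_single ids1 ids2 max_length allow_truncation out) := by unfold Spec_prepro_sentence_pair_single; infer_instance

-- ===== CLAIM (what is proved, stated in full; the proofs are below) =====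
def Claim_equal_prepro_sentence_pair_single : Prop := ∀ (ids1 : List Int) (ids2 : List Int) (max_length : Int) (allow_truncation : Bool), Dom_prepro_sentence_pair_single ids1 ids2 max_length allow_truncation → Pre_prepro_sentence_pair_single ids1 ids2 max_length allow_truncation → Spec_prepro_sentence_pair_single ids1 ids2 max_length allow_truncation (prepro_sentence_pair_single ids1 ids2 max_length allow_truncation)

-- ===== LEMMAS AND PROOFS =====

-- a fold that appends one element to each of three accumulated lists is three maps
theorem foldl_append3_eq_map (l : List Int) (f g h : Int → Int) (acc : List Int × List Int × List Int) :
    l.foldl (fun acc i => (acc.1 ++ [f i], acc.2.1 ++ [g i], acc.2.2 ++ [h i])) acc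
      = (acc.1 ++ l.map f, acc.2.1 ++ l.map g, acc.2.2 ++ l.map h) := by
  induction l generalizing acc with
  | nil => simp
  | cons x xs ih => simp [List.foldl_cons, ih]

theorem map_const_pyRange (a b c : Int) :
    (PySem.List.pyRange a b 1).map (fun _ => c) = List.replicate (b - a).toNat c := by
  rw [PySem.List.pyRange_one, List.map_map]
  simp [Function.comp_def, List.map_const']

theorem map_pyGetD_shift (ys : List Int) (n1 : Int) :
    (PySem.List.pyRange n1 (n1 + (ys.length : Int)) 1).map
      (fun i => PySem.List.pyGetD ys (i - n1) 0) = ys := by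
  rw [PySem.List.pyRange_one, List.map_map]
  have h0 := PySem.List.map_pyGetD_pyRange_zero ys (0 : Int)
  rw [PySem.List.len_eq, PySem.List.pyRange_one, List.map_map] at h0
  have e : (fun i => PySem.List.pyGetD ys (i - n1) 0) ∘ (fun k : Nat => n1 + (k : Int))
      = (fun j => PySem.List.pyGetD ys j 0) ∘ (fun k : Nat => (0 : Int) + (k : Int)) := by
    funext k; simp
  rw [show (n1 + (ys.length : Int) - n1).toNat = ((ys.length : Int) - 0).toNat by omega, e]
  exact h0

-- the main computation: B's fold over [0, m) equals A's three segment concatenations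
theorem alt_loop_eq (xs ys : List Int) (m : Int)
    (hm : (xs.length : Int) + (ys.length : Int) ≤ m) :
    (PySem.List.pyRange 0 m 1).foldl
      (fun acc i =>
        if i < (xs.length : Int) then
          (acc.1 ++ [PySem.List.pyGetD xs i 0], acc.2.1 ++ [(1 : Int)], acc.2.2 ++ [(0 : Int)])
        else if i < (xs.length : Int) + (ys.length : Int) then
          (acc.1 ++ [PySem.List.pyGetD ys (i - (xs.length : Int)) 0], acc.2.1 ++ [(1 : Int)], acc.2.2 ++ [(1 : Int)])
        else
          (acc.1 ++ [(0 : Int)], acc.2.1 ++ [(0 : Int)], acc.2.2 ++ [(0 : Int)]))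
      ([], [], [])
      = (xs ++ ys ++ (PySem.List.pyRange 0 (m - (xs.length : Int) - (ys.length : Int)) 1).map (fun _ => (0 : Int)),
         (xs ++ ys).map (fun _ => (1 : Int)) ++ (PySem.List.pyRange 0 (m - (xs.length : Int) - (ys.length : Int)) 1).map (fun _ => (0 : Int)),
         xs.map (fun _ => (0 : Int)) ++ ys.map (fun _ => (1 : Int)) ++ (PySem.List.pyRange 0 (m - (xs.length : Int) - (ys.length : Int)) 1).map (fun _ => (0 : Int))) := by
  have h1 : (0 : Int) ≤ (xs.length : Int) := by positivity
  have h2 : (xs.length : Int) ≤ (xs.length : Int) + (ys.length : Int) := by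
    have : (0 : Int) ≤ (ys.length : Int) := by positivity
    omega
  have hsplit : PySem.List.pyRange 0 m 1
      = PySem.List.pyRange 0 (xs.length : Int) 1
        ++ PySem.List.pyRange (xs.length : Int) ((xs.length : Int) + (ys.length : Int)) 1
        ++ PySem.List.pyRange ((xs.length : Int) + (ys.length : Int)) m 1 := by
    rw [← PySem.List.pyRange_one_append 0 (xs.length : Int) ((xs.length : Int) + (ys.length : Int)) h1 h2,
        ← PySem.List.pyRange_one_append 0 ((xs.length : Int) + (ys.length : Int)) m (le_trans h1 h2) hm]
  rw [hsplit, List.foldl_append, List.foldl_append]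
  rw [PySem.List.foldl_congr_mem (PySem.List.pyRange 0 (xs.length : Int) 1) _
        (fun acc i => (acc.1 ++ [PySem.List.pyGetD xs i 0], acc.2.1 ++ [(1 : Int)], acc.2.2 ++ [(0 : Int)]))
        ([], [], [])
        (by intro acc x hx
            rw [PySem.List.mem_pyRange_one] at hx
            simp [hx.2]),
      foldl_append3_eq_map]
  rw [PySem.List.foldl_congr_mem
        (PySem.List.pyRange (xs.length : Int) ((xs.length : Int) + (ys.length : Int)) 1) _
        (fun acc i => (acc.1 ++ [PySem.List.pyGetD ys (i - (xs.length : Int)) 0], acc.2.1 ++ [(1 : Int)], acc.2.2 ++ [(1 : Int)]))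
        _
        (by intro acc x hx
            rw [PySem.List.mem_pyRange_one] at hx
            have hge : ¬ x < (xs.length : Int) := not_lt.mpr hx.1
            simp [hge, hx.2]),
      foldl_append3_eq_map]
  rw [PySem.List.foldl_congr_mem
        (PySem.List.pyRange ((xs.length : Int) + (ys.length : Int)) m 1) _
        (fun acc _ => (acc.1 ++ [(0 : Int)], acc.2.1 ++ [(0 : Int)], acc.2.2 ++ [(0 : Int)]))
        _
        (by intro acc x hx
            rw [PySem.List.mem_pyRange_one] at hx
            have hge1 : ¬ x < (xs.length : Int) := not_lt.mpr (le_trans h2 hx.1)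
            have hge2 : ¬ x < (xs.length : Int) + (ys.length : Int) := not_lt.mpr hx.1
            simp [hge1, hge2]),
      foldl_append3_eq_map]
  have m1 : (PySem.List.pyRange 0 (xs.length : Int) 1).map (fun i => PySem.List.pyGetD xs i 0) = xs := by
    have h0 := PySem.List.map_pyGetD_pyRange_zero xs (0 : Int)
    rwa [PySem.List.len_eq] at h0
  have m2 := map_pyGetD_shift ys (xs.length : Int)
  rw [m1, m2, map_const_pyRange, map_const_pyRange, map_const_pyRange, map_const_pyRange]
  have l1 : ((xs.length : Int) - 0).toNat = xs.length := by omega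
  have l2 : ((xs.length : Int) + (ys.length : Int) - (xs.length : Int)).toNat = ys.length := by omega
  have l3 : (m - ((xs.length : Int) + (ys.length : Int))).toNat
      = (m - (xs.length : Int) - (ys.length : Int)).toNat := by omega
  rw [l1, l2, l3]
  simp only [List.nil_append, List.append_assoc, List.map_append, List.map_const']
  simp [PySem.List.length_pyRange_one]

-- ===== VERDICT (by name: the statement is the Claim_ definition above) =====
theorem prepro_sentence_pair_single_spec : Claim_equal_prepro_sentence_pair_single := by
  intro ids1 ids2 max_length allow_truncation _ hpre
  unfold Spec_prepro_sentence_pair_single prepro_sentence_pair_single prepro_sentence_pair_single_alt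
  unfold Pre_prepro_sentence_pair_single at hpre
  by_cases hc : allow_truncation = true ∧ (ids1.length : Int) + (ids2.length : Int) > max_length
  · rw [if_pos hc] at hpre
    have hb : (allow_truncation && decide ((ids1.length : Int) + (ids2.length : Int) > max_length)) = true := by
      simp [hc.1, hc.2]
    rw [if_pos hb]
    have hnn : (0 : Int) ≤ (ids1.length : Int) + (ids2.length : Int) - max_length := by
      have := hc.2; omega
    have hlen : (((PySem.List.slice ids1 (some ((ids1.length : Int) + (ids2.length : Int) - max_length)) none).length : Int))
        + (ids2.length : Int) ≤ max_length := by
      rw [PySem.List.slice_from _ hnn, List.length_drop]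
      have h2m : (ids2.length : Int) ≤ max_length := hpre
      omega
    exact (alt_loop_eq _ ids2 max_length hlen).symm
  · rw [if_neg hc] at hpre
    have hb : (allow_truncation && decide ((ids1.length : Int) + (ids2.length : Int) > max_length)) = false := by
      cases hval : allow_truncation with
      | false => simp
      | true =>
        have hnp : ¬ ((ids1.length : Int) + (ids2.length : Int) > max_length) := fun hp => hc ⟨hval, hp⟩
        simp [hnp]
    have hb' : ¬ ((allow_truncation && decide ((ids1.length : Int) + (ids2.length : Int) > max_length)) = true) := by
      simp [hb]
    rw [if_neg hb']
    exact (alt_loop_eq ids1 ids2 max_length hpre).symm
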